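-- pv_equiv track=rewrite | github.com/EvsyukovD/PythonLabs | lab5/md4_base.py | addbits
-- ===== SOURCE A (Python) =====
-- def addbits(strbits):
--     l = len(strbits) % 512
--     # strbits = bin(bits).strip('0b')
--     res = strbits + '1'
--     if l < 448:
--         d = 447 - l
--         for i in range(d):
--             res += '0'
--     else:
--         d = l - 448
--         for i in range(511 - d):
--             res += '0'
--     return res
-- ===== SOURCE B (Python) =====
-- def addbits(strbits):
--     zeros = (447 - len(strbits) % 512) % 512
--     return strbits + '1' + '0' * zeros
-- ===== Notes on version B (the rewrite author's own statement) =====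
-- stated objective: simpler
-- what changed: Replaced the two-branch if/else with character-append loops by a single closed-form modular expression (447 - len%512) % 512 and one string-repetition, eliminating all branching and the loop.
import Mathlib
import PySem

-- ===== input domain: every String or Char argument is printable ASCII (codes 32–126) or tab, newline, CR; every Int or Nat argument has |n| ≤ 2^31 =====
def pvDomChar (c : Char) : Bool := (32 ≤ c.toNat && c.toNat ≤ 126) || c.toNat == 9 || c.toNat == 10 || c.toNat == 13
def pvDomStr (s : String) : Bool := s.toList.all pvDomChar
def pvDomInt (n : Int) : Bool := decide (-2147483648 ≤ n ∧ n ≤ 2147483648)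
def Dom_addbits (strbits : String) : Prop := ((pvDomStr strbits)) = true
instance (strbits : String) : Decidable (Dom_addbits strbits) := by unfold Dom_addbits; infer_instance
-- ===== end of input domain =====

-- B replaces A's two branches with append loops by one closed-form zero count
-- (447 - len % 512) % 512 and a single repetition; return values proved equal on all inputs.

-- ===== PORT A =====
def addbits (strbits : String) : String :=
  let l : Int := PySem.Int.mod (PySem.Str.len strbits) 512
  let res : List Char := strbits.toList ++ ['1']
  if l < 448 then
    let d : Int := 447 - l
    String.mk ((PySem.List.pyRange 0 d 1).foldl (fun r _ => r ++ ['0']) res)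
  else
    let d : Int := l - 448
    String.mk ((PySem.List.pyRange 0 (511 - d) 1).foldl (fun r _ => r ++ ['0']) res)

-- ===== PORT B =====
def addbits_alt (strbits : String) : String :=
  let zeros : Int := PySem.Int.mod (447 - PySem.Int.mod (PySem.Str.len strbits) 512) 512
  String.mk (strbits.toList ++ '1' :: List.replicate zeros.toNat '0')

-- ===== PRECONDITION & SPEC =====
def Spec_addbits (strbits : String) (out : String) : Prop := out = addbits_alt strbits
instance (strbits : String) (out : String) : Decidable (Spec_addbits strbits out) := by unfold Spec_addbits; infer_instance

-- ===== CLAIM (what is proved, stated in full; the proofs are below) =====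
def Claim_equal_addbits : Prop := ∀ (strbits : String), Dom_addbits strbits → Spec_addbits strbits (addbits strbits)

-- ===== LEMMAS AND PROOFS =====

-- A's for-loop appending '0' once per iteration appends xs.length zeros.
theorem foldl_append_zero (xs : List Int) (r : List Char) :
    xs.foldl (fun r _ => r ++ ['0']) r = r ++ List.replicate xs.length '0' := by
  induction xs generalizing r with
  | nil => simp
  | cons x xs ih =>
      simp [List.foldl, ih, List.replicate_succ, List.append_assoc]

-- ===== VERDICT (by name: the statement is the Claim_ definition above) =====
theorem addbits_spec : Claim_equal_addbits := by
  unfold Claim_equal_addbits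
  intro s _
  unfold Spec_addbits addbits addbits_alt
  have h512 : (0:Int) < 512 := by norm_num
  simp only [PySem.Int.mod_eq_emod_of_pos h512]
  have hlen : PySem.Str.len s = (s.toList.length : Int) := by
    simp [PySem.Str.len_eq]
  simp only [hlen]
  set n : Int := (s.toList.length : Int) % 512 with hn
  have hn0 : 0 ≤ n := Int.emod_nonneg _ (by norm_num)
  have hn512 : n < 512 := Int.emod_lt_of_pos _ h512
  by_cases h : n < 448
  · simp only [h, if_true]
    rw [foldl_append_zero, PySem.List.length_pyRange_one]
    have : ((447 - n) % 512).toNat = (447 - n - 0).toNat := by omega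
    simp [List.append_assoc, this]
  · simp only [h, if_false]
    rw [foldl_append_zero, PySem.List.length_pyRange_one]
    have : ((447 - n) % 512).toNat = (511 - (n - 448) - 0).toNat := by omega
    simp [List.append_assoc, this]
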